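-- pv_equiv track=rewrite | github.com/Ragavi203/DASH-AI | backend/app/services/charts.py | _pick_best_datetime
-- ===== SOURCE A (Python) =====
-- from typing import Any
--
-- def _pick_best_datetime(dt_cols: list[str], col_profile: dict[str, Any]) -> str | None:
--     if not dt_cols:
--         return None
--     ranked = []
--     for c in dt_cols:
--         info = col_profile.get(c, {}) or {}
--         count = info.get("count") or 0
--         ranked.append((int(count), c))
--     ranked.sort(reverse=True)
--     return ranked[0][1] if ranked else None
-- ===== SOURCE B (Python) =====
-- def _pick_best_datetime(dt_cols, col_profile):
--     best = None
--     for c in dt_cols: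
--         info = col_profile.get(c) or {}
--         cand = (int(info.get("count") or 0), c)
--         if best is None or cand > best:
--             best = cand
--     return best[1] if best is not None else None
-- ===== Notes on version B (the rewrite author's own statement) =====
-- stated objective: simpler
-- what changed: Replaces the build-list-of-tuples + reverse-sort + take-head with a single linear pass that keeps a running best (count, name) tuple under strict lexicographic comparison.
import Mathlib
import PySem

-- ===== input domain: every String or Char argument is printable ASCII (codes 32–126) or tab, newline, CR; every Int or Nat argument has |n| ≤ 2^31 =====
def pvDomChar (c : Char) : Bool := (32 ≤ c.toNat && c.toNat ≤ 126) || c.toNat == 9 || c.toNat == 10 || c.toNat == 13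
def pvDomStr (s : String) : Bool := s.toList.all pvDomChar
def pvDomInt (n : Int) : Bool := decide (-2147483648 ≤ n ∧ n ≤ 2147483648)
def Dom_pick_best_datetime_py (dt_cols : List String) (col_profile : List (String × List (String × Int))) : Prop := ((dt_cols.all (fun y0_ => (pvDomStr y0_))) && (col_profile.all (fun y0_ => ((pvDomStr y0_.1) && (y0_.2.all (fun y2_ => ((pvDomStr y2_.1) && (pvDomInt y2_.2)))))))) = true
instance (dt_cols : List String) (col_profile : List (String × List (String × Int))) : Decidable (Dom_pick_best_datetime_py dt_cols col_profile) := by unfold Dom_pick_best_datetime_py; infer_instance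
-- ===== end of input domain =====

-- B replaces A's list-of-tuples + reverse sort + head by one linear pass keeping a running best (count, name) tuple; same return value.

-- ===== PORT A =====
def pick_best_datetime_py (dt_cols : List String) (col_profile : List (String × List (String × Int))) : Option String :=
  if dt_cols = [] then none
  else
    -- ranked.append((int(count), c)) for each c
    let ranked : List (Int × String) := dt_cols.foldl (fun acc c =>
      let info := PySem.Dict.getD (PySem.Dict.mk col_profile) c []
      -- info.get("count") or 0 : the only falsy Int is 0, so 'or 0' maps none and 0 to 0
      let count : Int := match PySem.Dict.get? (PySem.Dict.mk info) "count" with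
        | none => 0
        | some v => if v == 0 then 0 else v
      acc ++ [(count, c)]) []
    -- ranked.sort(reverse=True): sort by the full (count, name) tuple, descending
    let ranked := PySem.List.sorted2 ranked (fun p => p.1) (fun p => p.2) true
    match ranked with
    | [] => none
    | p :: _ => some p.2

-- ===== PORT B =====
-- candidate tuple for column c: (int(info.get("count") or 0), c)
def pbdCand (col_profile : List (String × List (String × Int))) (c : String) : Int × String :=
  let info := PySem.Dict.getD (PySem.Dict.mk col_profile) c []
  (match PySem.Dict.get? (PySem.Dict.mk info) "count" with
   | none => 0
   | some v => if v == 0 then 0 else v, c)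

def pick_best_datetime_py_alt (dt_cols : List String) (col_profile : List (String × List (String × Int))) : Option String :=
  let best := dt_cols.foldl (fun best c =>
    let cand := pbdCand col_profile c
    match best with
    | none => some cand
    | some b => if b.1 < cand.1 || (b.1 == cand.1 && b.2 < cand.2) then some cand else some b) none
  best.map (fun b => b.2)

-- ===== PRECONDITION & SPEC =====
def Spec_pick_best_datetime_py (dt_cols : List String) (col_profile : List (String × List (String × Int))) (out : Option String) : Prop := out = pick_best_datetime_py_alt dt_cols col_profile
instance (dt_cols : List String) (col_profile : List (String × List (String × Int))) (out : Option String) : Decidable (Spec_pick_best_datetime_py dt_cols col_profile out) := by unfold Spec_pick_best_datetime_py; infer_instance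

-- ===== CLAIM (what is proved, stated in full; the proofs are below) =====
def Claim_equal_pick_best_datetime_py : Prop := ∀ (dt_cols : List String) (col_profile : List (String × List (String × Int))), Dom_pick_best_datetime_py dt_cols col_profile → Spec_pick_best_datetime_py dt_cols col_profile (pick_best_datetime_py dt_cols col_profile)

-- ===== LEMMAS AND PROOFS =====

-- B's step on the running best, abstracted over the strict-lex test
def pbdStep (b : Option (Int × String)) (x : Int × String) : Option (Int × String) :=
  match b with
  | none => some x
  | some m => if m.1 < x.1 || (m.1 == x.1 && m.2 < x.2) then some x else some m

-- the comparison sorted2's insertion uses, as a strict-lex test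
lemma pbd_lt_iff (m x : Int × String) :
    (decide (m.1 < x.1) || !decide (x.1 < m.1) && decide (m.2 < x.2)) =
    (decide (m.1 < x.1) || (m.1 == x.1 && decide (m.2 < x.2))) := by
  by_cases h1 : m.1 < x.1
  · simp [h1]
  · by_cases h2 : x.1 < m.1
    · have hne : m.1 ≠ x.1 := ne_of_gt h2
      simp [h1, h2, hne]
    · have he : m.1 = x.1 := by omega
      simp [he]

lemma head_insertBy (x : Int × String) (acc : List (Int × String)) :
    (PySem.List.insertBy
      (fun a b => decide (b.1 < a.1) || !decide (a.1 < b.1) && decide (b.2 < a.2)) x acc).head? =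
    pbdStep acc.head? x := by
  cases acc with
  | nil => simp [PySem.List.insertBy, pbdStep]
  | cons y ys =>
    simp only [PySem.List.insertBy, pbdStep, List.head?_cons]
    simp only [pbd_lt_iff]
    split_ifs <;> simp_all

lemma head_foldl_insertBy (l : List (Int × String)) (acc : List (Int × String)) :
    (l.foldl (fun acc x =>
      PySem.List.insertBy
        (fun a b => decide (b.1 < a.1) || !decide (a.1 < b.1) && decide (b.2 < a.2)) x acc) acc).head? =
    l.foldl pbdStep acc.head? := by
  induction l generalizing acc with
  | nil => rfl
  | cons x t ih => simp only [List.foldl_cons, ih, head_insertBy]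

lemma foldl_append_map (l : List String) (f : String → Int × String) (acc : List (Int × String)) :
    l.foldl (fun acc c => acc ++ [f c]) acc = acc ++ l.map f := by
  induction l generalizing acc with
  | nil => simp
  | cons c t ih => simp [ih]

-- ===== VERDICT (by name: the statement is the Claim_ definition above) =====
theorem pick_best_datetime_py_spec : Claim_equal_pick_best_datetime_py := by
  intro dt_cols col_profile _
  unfold Spec_pick_best_datetime_py pick_best_datetime_py pick_best_datetime_py_alt
  by_cases h : dt_cols = []
  · simp [h]
  · simp only [h, if_false]
    have hfold :
        dt_cols.foldl (fun best c =>
          let cand := pbdCand col_profile c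
          match best with
          | none => some cand
          | some b => if b.1 < cand.1 || (b.1 == cand.1 && b.2 < cand.2) then some cand else some b)
          (none : Option (Int × String)) =
        (dt_cols.map (pbdCand col_profile)).foldl pbdStep none := by
      rw [List.foldl_map]
      have hfun : (fun (best : Option (Int × String)) (c : String) =>
          let cand := pbdCand col_profile c
          match best with
          | none => some cand
          | some b => if b.1 < cand.1 || (b.1 == cand.1 && b.2 < cand.2) then some cand else some b) =
          fun b c => pbdStep b (pbdCand col_profile c) := by
        funext b c
        cases b <;> rfl
      rw [hfun]
    have hr :
        dt_cols.foldl (fun acc c =>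
          let info := PySem.Dict.getD (PySem.Dict.mk col_profile) c []
          let count : Int := match PySem.Dict.get? (PySem.Dict.mk info) "count" with
            | none => 0
            | some v => if v == 0 then 0 else v
          acc ++ [(count, c)]) ([] : List (Int × String)) =
        dt_cols.map (pbdCand col_profile) := by
      have := foldl_append_map dt_cols (pbdCand col_profile) []
      simpa [pbdCand] using this
    rw [hr, hfold]
    have hhead := head_foldl_insertBy (dt_cols.map (pbdCand col_profile)) []
    simp only [List.head?_nil] at hhead
    unfold PySem.List.sorted2
    simp only [reduceIte]
    cases hcase : ((dt_cols.map (pbdCand col_profile)).foldl (fun acc x =>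
        PySem.List.insertBy
          (fun a b => decide (b.1 < a.1) || !decide (a.1 < b.1) && decide (b.2 < a.2)) x acc) []) with
    | nil =>
      rw [hcase] at hhead
      simp at hhead
      rw [← hhead]
      rfl
    | cons p t =>
      rw [hcase] at hhead
      simp at hhead
      rw [← hhead]
      rfl
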